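-- pv_equiv track=rewrite | github.com/RivenKid69/AI-Powered-Quantitative-Research-Platform | scripts/download_economic_calendar.py | _classify_impact
-- ===== SOURCE A (Python) =====
-- def _classify_impact(event_name: str, currency: str) -> str:
--     """Classify event impact level based on event name."""
--     event_lower = event_name.lower()
--
--     # Check if it's a known high-impact event
--     high_impact_keywords = [
--         "rate decision", "non-farm", "payroll", "cpi", "inflation",
--         "gdp", "employment", "retail sales", "pmi",
--         "fomc", "ecb", "boe", "boj", "rba", "rbnz", "snb", "boc",
--     ]
--
--     for keyword in high_impact_keywords:
--         if keyword in event_lower: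
--             return "high"
--
--     medium_impact_keywords = [
--         "trade balance", "industrial", "housing", "consumer",
--         "sentiment", "confidence", "speech", "testimony",
--     ]
--
--     for keyword in medium_impact_keywords:
--         if keyword in event_lower:
--             return "medium"
--
--     return "low"
-- ===== SOURCE B (Python) =====
-- HIGH_KWS = ("rate decision", "non-farm", "payroll", "cpi", "inflation",
--             "gdp", "employment", "retail sales", "pmi",
--             "fomc", "ecb", "boe", "boj", "rba", "rbnz", "snb", "boc")
-- MEDIUM_KWS = ("trade balance", "industrial", "housing", "consumer",
--               "sentiment", "confidence", "speech", "testimony")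
--
--
-- def _classify_impact(event_name: str, currency: str) -> str:
--     """Single left-to-right scan over the string: at each position test all
--     keywords at once via startswith on the suffix, instead of one full
--     substring search per keyword."""
--     s = event_name.lower()
--     found_medium = False
--     for i in range(len(s)):
--         t = s[i:]
--         if t.startswith(HIGH_KWS):
--             return "high"
--         if not found_medium and t.startswith(MEDIUM_KWS):
--             found_medium = True
--     return "medium" if found_medium else "low"
-- ===== Notes on version B (the rewrite author's own statement) =====
-- stated objective: alternative
-- what changed: Instead of looping keyword-by-keyword with a full substring search per keyword, B makes a single left-to-right scan over the lowered string, testing all keywords at once (startswith on a tuple) at each position, with an early return on a high match and a flag for a medium match.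
import Mathlib
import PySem

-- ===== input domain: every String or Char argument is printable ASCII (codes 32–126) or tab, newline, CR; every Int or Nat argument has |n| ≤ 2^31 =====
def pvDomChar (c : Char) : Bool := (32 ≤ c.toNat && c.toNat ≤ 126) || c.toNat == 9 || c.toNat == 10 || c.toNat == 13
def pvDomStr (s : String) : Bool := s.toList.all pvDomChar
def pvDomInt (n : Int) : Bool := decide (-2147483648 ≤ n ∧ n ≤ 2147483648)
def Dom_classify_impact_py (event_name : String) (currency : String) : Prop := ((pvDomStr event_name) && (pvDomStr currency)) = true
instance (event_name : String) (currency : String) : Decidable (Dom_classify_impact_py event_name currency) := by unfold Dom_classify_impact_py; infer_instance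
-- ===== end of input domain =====

-- ===== PORT A =====
-- B differs from A only in algorithm: A loops keyword-by-keyword doing a full substring search each
-- time; B makes one left-to-right scan over the string testing all keywords per position (objective: alternative).
def pvHighKws : List String :=
  ["rate decision", "non-farm", "payroll", "cpi", "inflation",
   "gdp", "employment", "retail sales", "pmi",
   "fomc", "ecb", "boe", "boj", "rba", "rbnz", "snb", "boc"]

def pvMediumKws : List String :=
  ["trade balance", "industrial", "housing", "consumer",
   "sentiment", "confidence", "speech", "testimony"]

-- 'for keyword in kws: if keyword in event_lower: return True' (early-exit loop of A)
def pvLoopMatch (kws : List String) (s : String) : Bool :=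
  match kws with
  | [] => false
  | k :: rest => if PySem.Str.isIn k s then true else pvLoopMatch rest s

def classify_impact_py (event_name : String) (_currency : String) : String :=
  let event_lower := PySem.Str.lower event_name
  if pvLoopMatch pvHighKws event_lower then "high"
  else if pvLoopMatch pvMediumKws event_lower then "medium"
  else "low"

-- ===== PORT B =====
-- Source B's loop 'for i in range(len(s)): t = s[i:] …' : one pass over the suffixes of s,
-- early return on a high match, a flag for a medium match.
def pvScan (t : List Char) (foundMedium : Bool) : String :=
  match t with
  | [] => if foundMedium then "medium" else "low"
  | _ :: rest =>
    if pvHighKws.any (fun k => PySem.Chars.startswith t k.toList) then "high"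
    else pvScan rest
      (foundMedium || pvMediumKws.any (fun k => PySem.Chars.startswith t k.toList))

def classify_impact_py_alt (event_name : String) (_currency : String) : String :=
  pvScan (PySem.Str.lower event_name).toList false

-- ===== PRECONDITION & SPEC =====
def Spec_classify_impact_py (event_name : String) (currency : String) (out : String) : Prop := out = classify_impact_py_alt event_name currency
instance (event_name : String) (currency : String) (out : String) : Decidable (Spec_classify_impact_py event_name currency out) := by unfold Spec_classify_impact_py; infer_instance

-- ===== CLAIM (what is proved, stated in full; the proofs are below) =====
def Claim_equal_classify_impact_py : Prop := ∀ (event_name : String) (currency : String), Dom_classify_impact_py event_name currency → Spec_classify_impact_py event_name currency (classify_impact_py event_name currency)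

-- ===== LEMMAS AND PROOFS =====

theorem pvLoopMatch_eq_any (kws : List String) (s : String) :
    pvLoopMatch kws s = kws.any (fun k => PySem.Chars.isIn k.toList s.toList) := by
  induction kws with
  | nil => rfl
  | cons k rest ih =>
    simp only [pvLoopMatch, List.any_cons, PySem.Str.isIn_eq]
    by_cases h : PySem.Chars.isIn k.toList s.toList = true <;> simp [h, ih]

theorem pvIsIn_cons (k : List Char) (c : Char) (rest : List Char) :
    PySem.Chars.isIn k (c :: rest)
      = (PySem.Chars.startswith (c :: rest) k || PySem.Chars.isIn k rest) := by
  rw [Bool.eq_iff_iff]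
  simp [PySem.Chars.isIn_iff_infix, PySem.Chars.startswith_iff, List.infix_cons_iff]

theorem pvAny_isIn_cons (kws : List String) (c : Char) (rest : List Char) :
    kws.any (fun k => PySem.Chars.isIn k.toList (c :: rest))
      = (kws.any (fun k => PySem.Chars.startswith (c :: rest) k.toList)
         || kws.any (fun k => PySem.Chars.isIn k.toList rest)) := by
  have h : (fun k : String => PySem.Chars.isIn k.toList (c :: rest))
      = fun k => PySem.Chars.startswith (c :: rest) k.toList || PySem.Chars.isIn k.toList rest :=
    funext fun k => pvIsIn_cons k.toList c rest
  rw [h]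
  induction kws with
  | nil => rfl
  | cons k ks ih =>
    simp only [List.any_cons, ih]
    cases PySem.Chars.startswith (c :: rest) k.toList <;>
      cases PySem.Chars.isIn k.toList rest <;> simp

theorem pvScan_eq (l : List Char) (m : Bool) :
    pvScan l m
      = (if pvHighKws.any (fun k => PySem.Chars.isIn k.toList l) then "high"
         else if m || pvMediumKws.any (fun k => PySem.Chars.isIn k.toList l) then "medium"
         else "low") := by
  induction l generalizing m with
  | nil => cases m <;> decide
  | cons c rest ih =>
    simp only [pvScan, ih, pvAny_isIn_cons]
    by_cases h1 : pvHighKws.any (fun k => PySem.Chars.startswith (c :: rest) k.toList) = true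
    · simp [h1]
    · by_cases h2 : pvHighKws.any (fun k => PySem.Chars.isIn k.toList rest) = true
      · simp [h1, h2]
      · by_cases hm1 : pvMediumKws.any (fun k => PySem.Chars.startswith (c :: rest) k.toList) = true <;>
          cases m <;> simp [h1, h2, hm1]

-- ===== VERDICT (by name: the statement is the Claim_ definition above) =====
theorem classify_impact_py_spec : Claim_equal_classify_impact_py := by
  intro event_name currency _
  unfold Spec_classify_impact_py classify_impact_py classify_impact_py_alt
  rw [pvScan_eq]
  simp [pvLoopMatch_eq_any]
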